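-- pv_equiv track=rewrite | github.com/mudasirmohd/Shortmails | com/tse/summary_generator.py | get_sorted_tuples
-- ===== SOURCE A (Python) =====
-- def get_sorted_tuples(per_cluster_elements, final_cluster_sorted_rank_map, num_clusters):
--     max_values = max(per_cluster_elements.values())
--     sorted_tuples = []
--     k = 0
--     for i in range(max_values):
--         sub_list = []
--         for cluster in range(num_clusters):
--             if k < per_cluster_elements[cluster]:
--                 sub_list.append(final_cluster_sorted_rank_map[cluster][k])
--         k += 1
--         sorted_tuples.append(sub_list)
--     return sorted_tuples
-- ===== SOURCE B (Python) =====
-- def get_sorted_tuples(per_cluster_elements, final_cluster_sorted_rank_map, num_clusters):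
--     max_values = max(per_cluster_elements.values())
--     cols = [final_cluster_sorted_rank_map[c][:per_cluster_elements[c]]
--             for c in range(num_clusters) if per_cluster_elements[c] > 0]
--     sorted_tuples = []
--     for _ in range(max_values):
--         sorted_tuples.append([col[0] for col in cols if col])
--         cols = [col[1:] for col in cols]
--     return sorted_tuples
-- ===== Notes on version B (the rewrite author's own statement) =====
-- stated objective: alternative
-- what changed: B first truncates each non-empty cluster's ranked list into a list of columns, then repeatedly peels the heads of all columns to emit one row and keeps the tails, instead of A's row-major gather that re-indexes every cluster at every row index with a running counter.
-- outside the precondition, e.g. on get_sorted_tuples({1: 0}, {}, 1): A returns [], B raises KeyError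
import Mathlib
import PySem

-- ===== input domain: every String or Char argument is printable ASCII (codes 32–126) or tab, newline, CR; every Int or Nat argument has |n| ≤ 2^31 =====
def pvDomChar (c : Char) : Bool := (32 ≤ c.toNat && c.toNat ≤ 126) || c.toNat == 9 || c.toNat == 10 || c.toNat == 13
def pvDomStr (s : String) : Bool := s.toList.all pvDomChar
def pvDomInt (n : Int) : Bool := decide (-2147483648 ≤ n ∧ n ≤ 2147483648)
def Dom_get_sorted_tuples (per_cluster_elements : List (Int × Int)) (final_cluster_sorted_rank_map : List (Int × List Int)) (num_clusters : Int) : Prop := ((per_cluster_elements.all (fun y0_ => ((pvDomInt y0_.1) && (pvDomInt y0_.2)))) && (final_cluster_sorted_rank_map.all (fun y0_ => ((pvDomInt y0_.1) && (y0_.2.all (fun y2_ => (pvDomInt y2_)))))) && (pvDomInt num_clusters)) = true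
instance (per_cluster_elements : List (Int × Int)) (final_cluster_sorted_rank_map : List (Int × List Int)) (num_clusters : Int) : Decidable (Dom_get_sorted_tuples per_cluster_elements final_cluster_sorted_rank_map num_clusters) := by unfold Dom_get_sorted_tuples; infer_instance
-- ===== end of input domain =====

-- B truncates each non-empty cluster's ranked list into columns once, then repeatedly peels the
-- column heads to emit each row (keeping the tails), instead of A's row-major gather that
-- re-indexes every cluster per row with a running counter. Return-value equivalence only.

-- ===== PORT A =====
-- literal port of A: row-major gather; max() of an empty dict raises in Python (none branch,
-- excluded by Pre_); dict lookups are ported as getD with a default, exact under Pre_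
def get_sorted_tuples (per_cluster_elements : List (Int × Int)) (final_cluster_sorted_rank_map : List (Int × List Int)) (num_clusters : Int) : List (List Int) :=
  let d := PySem.Dict.ofList per_cluster_elements
  let m := PySem.Dict.ofList final_cluster_sorted_rank_map
  match PySem.List.max? d.values (fun v => v) with
  | none => []
  | some max_values =>
    ((PySem.List.pyRange 0 max_values 1).foldl
      (fun (st : List (List Int) × Int) _i =>
        (st.1 ++ [(PySem.List.pyRange 0 num_clusters 1).foldl
            (fun sl cluster =>
              if st.2 < d.getD cluster 0 then
                sl ++ [PySem.List.pyGetD (m.getD cluster []) st.2 0]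
              else sl) []],
         st.2 + 1))
      ([], 0)).1

-- ===== PORT B =====
-- literal port of Source B: columns = truncated lists of the non-empty clusters, then head-peeling;
-- '[col[0] for col in cols if col]' is filterMap head? (head? is none exactly on []), and
-- 'col[1:]' is List.tail (PySem.List.slice_from_one)
def get_sorted_tuples_alt (per_cluster_elements : List (Int × Int)) (final_cluster_sorted_rank_map : List (Int × List Int)) (num_clusters : Int) : List (List Int) :=
  let d := PySem.Dict.ofList per_cluster_elements
  let m := PySem.Dict.ofList final_cluster_sorted_rank_map
  match PySem.List.max? d.values (fun v => v) with
  | none => []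
  | some max_values =>
    let cols := (PySem.List.pyRange 0 num_clusters 1).foldl
      (fun cs c =>
        if 0 < d.getD c 0 then
          cs ++ [PySem.List.slice (m.getD c []) none (some (d.getD c 0))]
        else cs) []
    ((PySem.List.pyRange 0 max_values 1).foldl
      (fun (st : List (List Int) × List (List Int)) _i =>
        (st.1 ++ [st.2.filterMap List.head?], st.2.map List.tail))
      ([], cols)).1

-- ===== PRECONDITION & SPEC =====
-- Pre_ excludes exactly the inputs where the Python raises: empty dict (ValueError from max),
-- a cluster in range(num_clusters) missing from per_cluster_elements (KeyError), or a positive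
-- count with a missing/too-short ranked list (KeyError/IndexError); it additionally excludes the
-- corner where max(values) ≤ 0 with a cluster key missing, on which A returns [] before touching
-- the dict but B's column comprehension still reads per_cluster_elements[c] and raises KeyError.
def Pre_get_sorted_tuples (per_cluster_elements : List (Int × Int)) (final_cluster_sorted_rank_map : List (Int × List Int)) (num_clusters : Int) : Prop :=
  per_cluster_elements ≠ [] ∧
  -- (the size bound is implied by the per-cluster key requirement below: the distinct keys
  -- 0..num_clusters-1 all occur in the dict; it is stated first so Pre_ decides fast)
  num_clusters ≤ (PySem.Dict.ofList per_cluster_elements).size ∧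
  ∀ c ∈ PySem.List.pyRange 0 num_clusters 1,
    (PySem.Dict.ofList per_cluster_elements).get? c ≠ none ∧
    ((PySem.Dict.ofList per_cluster_elements).getD c 0 ≤ 0 ∨
      ((PySem.Dict.ofList final_cluster_sorted_rank_map).get? c ≠ none ∧
       (PySem.Dict.ofList per_cluster_elements).getD c 0 ≤
         (((PySem.Dict.ofList final_cluster_sorted_rank_map).getD c []).length : Int)))
instance (per_cluster_elements : List (Int × Int)) (final_cluster_sorted_rank_map : List (Int × List Int)) (num_clusters : Int) : Decidable (Pre_get_sorted_tuples per_cluster_elements final_cluster_sorted_rank_map num_clusters) := by unfold Pre_get_sorted_tuples; infer_instance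

def pvWitness_get_sorted_tuples : (List (Int × Int)) × (List (Int × List Int)) × Int := ([(0, 1)], [(0, [5])], 1)

def Spec_get_sorted_tuples (per_cluster_elements : List (Int × Int)) (final_cluster_sorted_rank_map : List (Int × List Int)) (num_clusters : Int) (out : List (List Int)) : Prop := out = get_sorted_tuples_alt per_cluster_elements final_cluster_sorted_rank_map num_clusters
instance (per_cluster_elements : List (Int × Int)) (final_cluster_sorted_rank_map : List (Int × List Int)) (num_clusters : Int) (out : List (List Int)) : Decidable (Spec_get_sorted_tuples per_cluster_elements final_cluster_sorted_rank_map num_clusters out) := by unfold Spec_get_sorted_tuples; infer_instance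

-- ===== CLAIM =====
def Claim_equal_get_sorted_tuples : Prop := ∀ (per_cluster_elements : List (Int × Int)) (final_cluster_sorted_rank_map : List (Int × List Int)) (num_clusters : Int), Dom_get_sorted_tuples per_cluster_elements final_cluster_sorted_rank_map num_clusters → Pre_get_sorted_tuples per_cluster_elements final_cluster_sorted_rank_map num_clusters → Spec_get_sorted_tuples per_cluster_elements final_cluster_sorted_rank_map num_clusters (get_sorted_tuples per_cluster_elements final_cluster_sorted_rank_map num_clusters)

-- ===== LEMMAS AND PROOFS =====

-- A's outer loop: appending row f(k) while incrementing k is a map over the row indices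
theorem gather_foldl_eq_map (l : List Int) (acc : List (List Int)) (k : Int) (f : Int → List Int) :
    (l.foldl (fun (st : List (List Int) × Int) _ => (st.1 ++ [f st.2], st.2 + 1)) (acc, k)).1
      = acc ++ (List.range l.length).map (fun (j : Nat) => f (k + (j : Int))) := by
  induction l generalizing acc k with
  | nil => simp
  | cons a t ih =>
    simp only [List.foldl_cons, ih, List.length_cons]
    have h : (List.range (t.length + 1)).map (fun (j : Nat) => f (k + (j : Int)))
        = f k :: (List.range t.length).map (fun (j : Nat) => f (k + 1 + (j : Int))) := by
      rw [List.range_succ_eq_map, List.map_cons, List.map_map]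
      refine congrArg₂ List.cons (by norm_num) ?_
      apply List.map_congr_left
      intro j _
      simp only [Function.comp_apply]
      congr 1
      push_cast
      ring
    rw [h, List.append_assoc, List.singleton_append]

-- B's outer loop: peeling heads j times in a row reads entry j of every column
theorem peel_foldl_eq_map (l : List Int) (acc cols : List (List Int)) :
    (l.foldl (fun (st : List (List Int) × List (List Int)) _ =>
        (st.1 ++ [st.2.filterMap List.head?], st.2.map List.tail)) (acc, cols)).1
      = acc ++ (List.range l.length).map
          (fun (j : Nat) => cols.filterMap (fun col => col[j]?)) := by
  induction l generalizing acc cols with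
  | nil => simp
  | cons a t ih =>
    simp only [List.foldl_cons, ih, List.length_cons]
    have h : (List.range (t.length + 1)).map (fun (j : Nat) => cols.filterMap (fun col => col[j]?))
        = cols.filterMap List.head?
            :: (List.range t.length).map
                 (fun (j : Nat) => (cols.map List.tail).filterMap (fun col => col[j]?)) := by
      rw [List.range_succ_eq_map, List.map_cons, List.map_map]
      refine congrArg₂ List.cons ?_ ?_
      · apply List.filterMap_congr
        intro col _
        simp [List.head?_eq_getElem?]
      · apply List.map_congr_left
        intro j _
        simp only [Function.comp_apply, List.filterMap_map]
        apply List.filterMap_congr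
        intro col _
        simp [List.getElem?_tail]
    rw [h, List.append_assoc, List.singleton_append]

-- one row: reading entry j of the truncated columns of the non-empty clusters is exactly
-- A's gather over the clusters with j < count (counts bounded by the list lengths)
theorem row_eq (j : Nat) (cs : List Int) (cnt : Int → Int) (mc : Int → List Int)
    (h : ∀ c ∈ cs, 0 < cnt c → cnt c ≤ ((mc c).length : Int)) :
    ((cs.filter (fun c => decide (0 < cnt c))).map
        (fun c => PySem.List.slice (mc c) none (some (cnt c)))).filterMap
          (fun col => col[j]?)
      = (cs.filter (fun c => decide ((j : Int) < cnt c))).map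
          (fun c => PySem.List.pyGetD (mc c) (j : Int) 0) := by
  induction cs with
  | nil => simp
  | cons c t ih =>
    have ht : ∀ c' ∈ t, 0 < cnt c' → cnt c' ≤ ((mc c').length : Int) :=
      fun c' hc' => h c' (List.mem_cons_of_mem _ hc')
    by_cases hj : (j : Int) < cnt c
    · have hpos : 0 < cnt c := by omega
      have hlen : cnt c ≤ ((mc c).length : Int) := h c (List.mem_cons_self) hpos
      have hjlen : j < (mc c).length := by omega
      have hslice : PySem.List.slice (mc c) none (some (cnt c)) = (mc c).take (cnt c).toNat :=
        PySem.List.slice_to _ (le_of_lt hpos)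
      have hjt : j < (cnt c).toNat := by omega
      have hget : ((mc c).take (cnt c).toNat)[j]? = some ((mc c)[j]) := by
        rw [List.getElem?_take_of_lt hjt, List.getElem?_eq_getElem hjlen]
      have hpy : PySem.List.pyGetD (mc c) (j : Int) 0 = (mc c)[j] := by
        rw [PySem.List.pyGetD_eq_getElem (mc c) 0 (by omega) (by exact_mod_cast hjlen)]
        simp
      simp only [List.filter_cons, decide_eq_true_eq, if_pos hpos, if_pos hj, List.map_cons,
        List.filterMap_cons, hslice, hget, hpy, ih ht]
    · by_cases hpos : 0 < cnt c
      · have hlen : cnt c ≤ ((mc c).length : Int) := h c (List.mem_cons_self) hpos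
        have hslice : PySem.List.slice (mc c) none (some (cnt c)) = (mc c).take (cnt c).toNat :=
          PySem.List.slice_to _ (le_of_lt hpos)
        have hget : ((mc c).take (cnt c).toNat)[j]? = none := by
          apply List.getElem?_eq_none
          have := List.length_take_le (cnt c).toNat (mc c)
          omega
        simp only [List.filter_cons, decide_eq_true_eq, if_pos hpos, if_neg hj, List.map_cons,
          List.filterMap_cons, hslice, hget, ih ht]
      · simp only [List.filter_cons, decide_eq_true_eq, if_neg hpos, if_neg hj, ih ht]

-- the two ports agree on every input admitted by Pre_
theorem ports_agree (pce : List (Int × Int)) (fmap : List (Int × List Int)) (nc : Int)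
    (hpre : Pre_get_sorted_tuples pce fmap nc) :
    get_sorted_tuples pce fmap nc = get_sorted_tuples_alt pce fmap nc := by
  unfold get_sorted_tuples get_sorted_tuples_alt
  rcases hmax : PySem.List.max? (PySem.Dict.ofList pce).values (fun v => v) with _ | mv
  · simp [hmax]
  · simp only [hmax]
    set d := PySem.Dict.ofList pce with hd
    set m := PySem.Dict.ofList fmap with hm
    have hgather := gather_foldl_eq_map (PySem.List.pyRange 0 mv 1) [] 0
      (fun kk => (PySem.List.pyRange 0 nc 1).foldl
        (fun sl cluster =>
          if kk < d.getD cluster 0 then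
            sl ++ [PySem.List.pyGetD (m.getD cluster []) kk 0]
          else sl) [])
    have hpeel := peel_foldl_eq_map (PySem.List.pyRange 0 mv 1) []
      ((PySem.List.pyRange 0 nc 1).foldl
        (fun cs c =>
          if 0 < d.getD c 0 then
            cs ++ [PySem.List.slice (m.getD c []) none (some (d.getD c 0))]
          else cs) [])
    rw [hgather, hpeel, PySem.List.foldl_append_ite (p := fun c => 0 < d.getD c 0)]
    simp only [List.nil_append]
    apply List.map_congr_left
    intro j _
    rw [PySem.List.foldl_append_ite (p := fun c => (0 : Int) + (j : Int) < d.getD c 0)]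
    simp only [List.nil_append, zero_add]
    exact (row_eq j (PySem.List.pyRange 0 nc 1) (fun c => d.getD c 0) (fun c => m.getD c [])
      (fun c hc hpos => by
        simp only [hd, hm]
        rcases (hpre.2.2 c hc).2 with hle | ⟨_, hle⟩
        · simp only [hd] at hpos; omega
        · exact hle)).symm

-- ===== VERDICT =====
theorem get_sorted_tuples_spec : Claim_equal_get_sorted_tuples := by
  intro pce fmap nc _dom hpre
  unfold Spec_get_sorted_tuples
  exact ports_agree pce fmap nc hpre
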